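-- pv_equiv track=rewrite | github.com/gsygh/YeConnector | recommend_system/predict.py | P_ArrSeq
-- ===== SOURCE A (Python) =====
-- def P_ArrSeq(pred, itemAr):
--     itemArr = [[0 for col in range(len(itemAr[0]))] for row in range(len(itemAr))]
--     for i in range(len(itemArr)):
--         for j in range(len(itemArr[0])):
--             itemArr[i][j] = itemAr[i][j]
--     #itemArr
--     # for i in range(len(itemArr)):
--     #     for j in range(len(itemArr[0])):
--     #         if itemArr[i][j] != 0:
--     #             pred[i][j] = 0
--     predSeq = [[0 for col in range(len(pred[0]))] for row in range(len(pred))]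
--     for j in range(len(itemArr[0])):
--         n=0
--         for i in range(len(itemArr)):
--             predSeq[i][j] = n
--             n+=1
--
--     for j in range(len(itemArr[0])):
--         i=0
--         while i <(len(itemArr)-1):
--
--             k=0
--             max = itemArr[i][j]
--             while k<(len(itemArr)-1-i):
--                 z= i+k+1
--                 if max <= itemArr[z][j]:
--                     max = itemArr[z][j]
--                     itemArr[z][j] = itemArr[i][j]
--                     itemArr[i][j] = max
--                     temp_seq = predSeq[z][j]
--                     predSeq[z][j] = predSeq[i][j]
--                     predSeq[i][j] = temp_seq
--                 k += 1
--             i += 1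
--
--     return pred, predSeq
-- ===== SOURCE B (Python) =====
-- def P_ArrSeq(pred, itemAr):
--     nrows = len(itemAr)
--     ncols = len(itemAr[0])
--     predSeq = [[0] * len(pred[0]) for _ in pred]
--     for j in range(ncols):
--         order = sorted(range(nrows), key=lambda i: (itemAr[i][j], i), reverse=True)
--         for i, idx in enumerate(order):
--             predSeq[i][j] = idx
--     return pred, predSeq
-- ===== Notes on version B (the rewrite author's own statement) =====
-- stated objective: faster
-- what changed: Replaces the per-column in-place selection sort with nested swap scans (which also maintained a mutated copy of the value matrix) by a single sorted() call per column on row indices keyed (value, index) descending, writing the resulting index order straight into predSeq.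
import Mathlib
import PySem

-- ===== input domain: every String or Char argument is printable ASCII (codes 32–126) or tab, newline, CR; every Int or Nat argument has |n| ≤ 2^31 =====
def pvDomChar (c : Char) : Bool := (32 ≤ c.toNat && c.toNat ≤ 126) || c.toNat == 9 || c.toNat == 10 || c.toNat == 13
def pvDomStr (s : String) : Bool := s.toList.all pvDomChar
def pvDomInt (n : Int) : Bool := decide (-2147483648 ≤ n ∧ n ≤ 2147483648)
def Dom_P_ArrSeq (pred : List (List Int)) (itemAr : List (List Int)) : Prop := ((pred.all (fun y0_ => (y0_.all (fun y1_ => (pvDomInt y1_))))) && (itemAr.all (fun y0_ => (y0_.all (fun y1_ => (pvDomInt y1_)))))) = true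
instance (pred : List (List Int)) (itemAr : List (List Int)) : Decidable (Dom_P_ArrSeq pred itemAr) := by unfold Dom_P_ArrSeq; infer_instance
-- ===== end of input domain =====

-- B replaces A's O(rows^2)-per-column in-place selection sort (nested swap scans over two
-- mutated matrices) by one sorted() call per column on row indices keyed (value, index)
-- descending, written straight into predSeq (objective: faster, measured).


-- ===== PORT A =====
-- shared 2D-array helpers: Python's m[i][j] read and m[i][j] = v write (all admitted indices are in range)
def pvGet2 (m : List (List Int)) (i j : Nat) : Int := (m.getD i []).getD j 0
def pvSet2 (m : List (List Int)) (i j : Nat) (v : Int) : List (List Int) :=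
  m.set i ((m.getD i []).set j v)

def P_ArrSeq (pred : List (List Int)) (itemAr : List (List Int)) : List (List Int) × List (List Int) :=
  -- itemArr = [[0 …] …]; then the element-by-element copy loop
  let nr := itemAr.length
  let nc := (itemAr.headD []).length
  let itemArr0 := (List.range nr).map (fun _ => (List.range nc).map (fun _ => (0 : Int)))
  let itemArr1 := (List.range nr).foldl (fun m i =>
      (List.range nc).foldl (fun m j => pvSet2 m i j (pvGet2 itemAr i j)) m) itemArr0
  -- predSeq = [[0 …] …]; then the numbering loop with counter n
  let predSeq0 := (List.range pred.length).map (fun _ =>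
      (List.range (pred.headD []).length).map (fun _ => (0 : Int)))
  let predSeq1 := (List.range nc).foldl (fun ps j =>
      ((List.range nr).foldl (fun (st : List (List Int) × Int) i =>
          (pvSet2 st.1 i j st.2, st.2 + 1)) (ps, (0 : Int))).1) predSeq0
  -- the per-column selection sort with joint swaps in itemArr and predSeq
  let final := (List.range nc).foldl (fun (st : List (List Int) × List (List Int)) j =>
      (List.range (nr - 1)).foldl (fun st i =>
        let r := (List.range (nr - 1 - i)).foldl
          (fun (st2 : Int × List (List Int) × List (List Int)) k =>
            let z := i + k + 1
            if st2.1 ≤ pvGet2 st2.2.1 z j then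
              let mx := pvGet2 st2.2.1 z j
              let ia := pvSet2 st2.2.1 z j (pvGet2 st2.2.1 i j)
              let ia := pvSet2 ia i j mx
              let t := pvGet2 st2.2.2 z j
              let ps := pvSet2 st2.2.2 z j (pvGet2 st2.2.2 i j)
              let ps := pvSet2 ps i j t
              (mx, ia, ps)
            else st2)
          (pvGet2 st.1 i j, st.1, st.2)
        (r.2.1, r.2.2)) st) (itemArr1, predSeq1)
  (pred, final.2)

-- ===== PORT B =====
def P_ArrSeq_alt (pred : List (List Int)) (itemAr : List (List Int)) : List (List Int) × List (List Int) :=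
  let nrows := itemAr.length
  let ncols := (itemAr.headD []).length
  let predSeq0 := pred.map (fun _ => List.replicate (pred.headD []).length (0 : Int))
  let predSeq := (List.range ncols).foldl (fun ps j =>
      let order := PySem.List.sorted2 ((List.range nrows).map (fun i => (Int.ofNat i)))
          (fun i => pvGet2 itemAr i.toNat j) (fun i => i) true
      (PySem.List.enumerate order).foldl (fun ps p => pvSet2 ps p.1.toNat j p.2) ps) predSeq0
  (pred, predSeq)

-- ===== PRECONDITION & SPEC =====
-- Pre_ excludes exactly the inputs on which Python A raises IndexError: an empty itemAr, and —
-- when itemAr has at least one column — an itemAr row shorter than row 0, an empty pred,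
-- fewer pred rows than itemAr rows, or a pred row 0 shorter than itemAr's row 0.
def Pre_P_ArrSeq (pred : List (List Int)) (itemAr : List (List Int)) : Prop :=
  itemAr ≠ [] ∧
  ((itemAr.headD []).length = 0 ∨
    ((∀ r ∈ itemAr, (itemAr.headD []).length ≤ r.length) ∧ pred ≠ [] ∧
      itemAr.length ≤ pred.length ∧ (itemAr.headD []).length ≤ (pred.headD []).length))
instance (pred : List (List Int)) (itemAr : List (List Int)) : Decidable (Pre_P_ArrSeq pred itemAr) := by
  unfold Pre_P_ArrSeq; infer_instance

def pvWitness_P_ArrSeq : List (List Int) × List (List Int) := ([[0], [0]], [[1], [2]])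

def Spec_P_ArrSeq (pred : List (List Int)) (itemAr : List (List Int)) (out : List (List Int) × List (List Int)) : Prop := out = P_ArrSeq_alt pred itemAr
instance (pred : List (List Int)) (itemAr : List (List Int)) (out : List (List Int) × List (List Int)) : Decidable (Spec_P_ArrSeq pred itemAr out) := by unfold Spec_P_ArrSeq; infer_instance

-- ===== CLAIM (what is proved, stated in full; the proofs are below) =====
def Claim_equal_P_ArrSeq : Prop := ∀ (pred : List (List Int)) (itemAr : List (List Int)), Dom_P_ArrSeq pred itemAr → Pre_P_ArrSeq pred itemAr → Spec_P_ArrSeq pred itemAr (P_ArrSeq pred itemAr)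

-- ===== LEMMAS AND PROOFS =====

-- low-level list helpers
theorem pvGetD_set_self (l : List Int) (i : Nat) (v : Int) (h : i < l.length) :
    (l.set i v).getD i 0 = v := by
  simp [List.getD_eq_getElem?_getD, h]

theorem pvGetD_set_ne (l : List Int) (i j : Nat) (v : Int) (h : i ≠ j) :
    (l.set i v).getD j 0 = l.getD j 0 := by
  simp [List.getD_eq_getElem?_getD, List.getElem?_set_ne h]

theorem pvSet_getD_self (l : List Int) (i : Nat) (h : i < l.length) :
    l.set i (l.getD i 0) = l := by
  rw [List.getD_eq_getElem l 0 h]; exact List.set_getElem_self ..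

theorem pvZip_set (a b : List Int) (i : Nat) (x y : Int) :
    (a.set i x).zip (b.set i y) = (a.zip b).set i (x, y) := by
  induction a generalizing b i with
  | nil => simp
  | cons ah t ih => cases b <;> cases i <;> simp_all

theorem pvZip_getD (a b : List Int) (i : Nat) (ha : i < a.length) (hb : i < b.length) :
    (a.zip b).getD i (0, 0) = (a.getD i 0, b.getD i 0) := by
  have hl : i < (a.zip b).length := by
    rw [List.length_zip]; omega
  rw [List.getD_eq_getElem _ _ hl, List.getElem_zip, List.getD_eq_getElem _ _ ha, List.getD_eq_getElem _ _ hb]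

theorem pvTake_set (l : List Int) (n i : Nat) (v : Int) (h : i < n) :
    (l.set i v).take n = (l.take n).set i v := by
  simp [List.take_set, h]


theorem pvDrop_set (l : List Int) (n i : Nat) (v : Int) (h : i < n) :
    (l.set i v).drop n = l.drop n := by
  rw [List.drop_set]; simp [Nat.not_le.mpr h]


theorem pvTake_getD (l : List Int) (n i : Nat) (h : i < n) :
    (l.take n).getD i 0 = l.getD i 0 := by
  rw [List.getD_eq_getElem?_getD, List.getD_eq_getElem?_getD, List.getElem?_take]
  simp [h]

theorem pvGetD_append_len (pre rest : List (Int × Int)) (m d : Int × Int) :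
    ((pre ++ m :: rest).getD pre.length d) = m := by
  simp [List.getD_eq_getElem?_getD]

theorem pvSet_append_len (pre rest : List (Int × Int)) (m v : Int × Int) :
    ((pre ++ m :: rest).set pre.length v) = pre ++ v :: rest := by
  rw [List.set_append_right _ _ (Nat.le_refl _)]; simp

-- column view of a matrix
def pvColOf (m : List (List Int)) (j : Nat) : List Int := m.map (fun r => r.getD j 0)
def pvShape (m : List (List Int)) (n c : Nat) : Prop := m.length = n ∧ ∀ r ∈ m, r.length = c


theorem pvRowLen {m : List (List Int)} {n c : Nat} (h : pvShape m n c) {i : Nat}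
    (hi : i < m.length) : (m.getD i []).length = c := by
  rw [List.getD_eq_getElem _ _ hi]; exact h.2 _ (List.getElem_mem _)

theorem pvShape_set2 {m : List (List Int)} {n c : Nat} (i j : Nat) (v : Int)
    (h : pvShape m n c) : pvShape (pvSet2 m i j v) n c := by
  by_cases hi : i < m.length
  · refine ⟨by simp [pvSet2, h.1], fun r hr => ?_⟩
    rcases List.mem_or_eq_of_mem_set hr with h' | h'
    · exact h.2 r h'
    · subst h'; simpa using pvRowLen h hi
  · unfold pvSet2
    rw [List.set_eq_of_length_le (Nat.le_of_not_lt hi)]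
    exact h
theorem pvLen_colOf (m : List (List Int)) (j : Nat) : (pvColOf m j).length = m.length := by
  simp [pvColOf]

theorem pvGet2_colOf (m : List (List Int)) (i j : Nat) :
    pvGet2 m i j = (pvColOf m j).getD i 0 := by
  by_cases hi : i < m.length
  · simp [pvGet2, pvColOf, List.getD_eq_getElem?_getD, List.getElem?_map, hi,
      List.getElem?_eq_getElem hi]
  · have h1 : m.getD i [] = [] := List.getD_eq_default _ _ (Nat.le_of_not_lt hi)
    have h2 : (pvColOf m j).getD i 0 = 0 := by
      apply List.getD_eq_default; rw [pvLen_colOf]; omega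
    unfold pvGet2; rw [h1, h2]; simp

theorem pvColOf_set2_self {m : List (List Int)} {n c : Nat} (h : pvShape m n c)
    (i : Nat) {j : Nat} (v : Int) (hj : j < c) :
    pvColOf (pvSet2 m i j v) j = (pvColOf m j).set i v := by
  unfold pvColOf pvSet2
  rw [List.map_set]
  by_cases hi : i < m.length
  · congr 1
    exact pvGetD_set_self _ _ _ ((pvRowLen h hi) ▸ hj)
  · rw [List.set_eq_of_length_le (by simpa using Nat.le_of_not_lt hi),
        List.set_eq_of_length_le (by simpa using Nat.le_of_not_lt hi)]

theorem pvColOf_set2_ne (m : List (List Int)) (i : Nat) {j j' : Nat} (v : Int) (hne : j' ≠ j) :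
    pvColOf (pvSet2 m i j v) j' = pvColOf m j' := by
  unfold pvColOf pvSet2
  rw [List.map_set]
  by_cases hi : i < m.length
  · rw [pvGetD_set_ne _ _ _ _ (Ne.symm hne)]
    have : (m.map (fun r => r.getD j' 0)).getD i 0 = (m.getD i []).getD j' 0 := by
      simp [List.getD_eq_getElem?_getD, List.getElem?_map, List.getElem?_eq_getElem hi]
    rw [← this, pvSet_getD_self _ _ (by simpa using hi)]
  · rw [List.set_eq_of_length_le (by simpa using Nat.le_of_not_lt hi)]

theorem pvEq_of_colOf {m₁ m₂ : List (List Int)} {n c : Nat}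
    (h₁ : pvShape m₁ n c) (h₂ : pvShape m₂ n c)
    (hc : ∀ j, j < c → pvColOf m₁ j = pvColOf m₂ j) : m₁ = m₂ := by
  apply List.ext_getElem (by rw [h₁.1, h₂.1])
  intro i hi1 hi2
  apply List.ext_getElem (by rw [h₁.2 _ (List.getElem_mem _), h₂.2 _ (List.getElem_mem _)])
  intro j hj1 hj2
  have e1 : m₁[i][j] = (pvColOf m₁ j).getD i 0 := by
    simp [pvColOf, List.getD_eq_getElem?_getD, List.getElem?_map, List.getElem?_eq_getElem hi1,
      List.getD_eq_getElem?_getD, List.getElem?_eq_getElem hj1]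
  have e2 : m₂[i][j] = (pvColOf m₂ j).getD i 0 := by
    simp [pvColOf, List.getD_eq_getElem?_getD, List.getElem?_map, List.getElem?_eq_getElem hi2,
      List.getD_eq_getElem?_getD, List.getElem?_eq_getElem hj2]
  rw [e1, e2, hc j (by rw [← h₁.2 _ (List.getElem_mem _)]; exact hj1)]

-- generic fold simulation
theorem pvFoldl_sim {α β ι : Type} (R : α → β → Prop) (f : α → ι → α) (g : β → ι → β) :
    ∀ (l : List ι) (a : α) (b : β), R a b → (∀ x ∈ l, ∀ a b, R a b → R (f a x) (g b x)) →
      R (l.foldl f a) (l.foldl g b) := by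
  intro l
  induction l with
  | nil => intro a b h _; exact h
  | cons x t ih =>
    intro a b h hstep
    exact ih _ _ (hstep x (by simp) a b h) (fun y hy => hstep y (by simp [hy]))

-- fold over distinct columns
theorem pvCol_fold {Mat γ : Type} (shapeOK : Mat → Prop) (colM : Mat → Nat → γ)
    (step : Mat → Nat → Mat) (t : Nat → γ → γ) (P : Nat → Prop)
    (h : ∀ m j, shapeOK m → P j → shapeOK (step m j) ∧
      (∀ j', j' ≠ j → colM (step m j) j' = colM m j') ∧ colM (step m j) j = t j (colM m j)) :
    ∀ (js : List Nat), js.Nodup → (∀ j ∈ js, P j) → ∀ m, shapeOK m →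
      shapeOK (js.foldl step m) ∧
      ∀ j', colM (js.foldl step m) j' = if j' ∈ js then t j' (colM m j') else colM m j' := by
  intro js
  induction js with
  | nil => intro _ _ m hm; exact ⟨hm, fun j' => by simp⟩
  | cons j0 t ih =>
    intro hnd hP m hm
    obtain ⟨hs, ho, hc⟩ := h m j0 hm (hP j0 (by simp))
    obtain ⟨hs', hcols⟩ := ih hnd.of_cons (fun j hj => hP j (by simp [hj])) _ hs
    refine ⟨by simpa using hs', fun j' => ?_⟩
    rw [List.foldl_cons] at *
    rw [hcols j']
    by_cases h1 : j' = j0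
    · subst h1
      have hnm : j' ∉ t := (List.nodup_cons.mp hnd).1
      simp [hnm, hc]
    · by_cases h2 : j' ∈ t <;> simp [h1, h2, ho j' h1]

-- prefix-filling folds
-- writing g i to position i for i < n fills the prefix
theorem pvSetAll (g : Nat → Int) :
    ∀ (n : Nat) (c : List Int), n ≤ c.length →
      (List.range n).foldl (fun c i => c.set i (g i)) c = (List.range n).map g ++ c.drop n := by
  intro n
  induction n with
  | zero => simp
  | succ n ih =>
    intro c hn
    rw [List.range_succ, List.foldl_append, List.map_append, ih c (by omega)]
    simp only [List.foldl_cons, List.foldl_nil, List.map_cons, List.map_nil]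
    have hlen : ((List.range n).map g).length = n := by simp
    rw [List.set_append_right _ _ (by omega), hlen, Nat.sub_self,
      List.drop_eq_getElem_cons (show n < c.length by omega), List.set_cons_zero]
    simp

-- a loop that repeatedly rewrites row i is one rewrite of row i
theorem pvFoldl_set_row {ι : Type} (l : List ι) (i : Nat) (f : List Int → ι → List Int) :
    ∀ (m : List (List Int)),
      l.foldl (fun m x => m.set i (f (m.getD i []) x)) m = m.set i (l.foldl f (m.getD i [])) := by
  induction l with
  | nil =>
    intro m
    simp only [List.foldl_nil]
    by_cases hi : i < m.length
    · rw [List.getD_eq_getElem _ _ hi, List.set_getElem_self]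
    · rw [List.set_eq_of_length_le (Nat.le_of_not_lt hi)]
  | cons x t ih =>
    intro m
    rw [List.foldl_cons, List.foldl_cons, ih]
    by_cases hi : i < m.length
    · rw [List.set_set]
      congr 1
      congr 1
      rw [List.getD_eq_getElem _ _ (by simpa using hi), List.getElem_set_self]
    · rw [List.set_eq_of_length_le (Nat.le_of_not_lt hi),
         List.set_eq_of_length_le (Nat.le_of_not_lt hi),
         List.set_eq_of_length_le (Nat.le_of_not_lt hi)]

-- row-by-row rewrite of the first n rows, each from the original row
theorem pvMatCopy (F : Nat → List Int → List Int) :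
    ∀ (n : Nat) (m : List (List Int)), n ≤ m.length →
      (List.range n).foldl (fun m i => m.set i (F i (m.getD i []))) m
        = (List.range n).map (fun i => F i (m.getD i [])) ++ m.drop n := by
  intro n
  induction n with
  | zero => simp
  | succ n ih =>
    intro m hn
    rw [List.range_succ, List.foldl_append, List.map_append, ih m (by omega)]
    simp only [List.foldl_cons, List.foldl_nil, List.map_cons, List.map_nil]
    have hlen : ((List.range n).map (fun i => F i (m.getD i []))).length = n := by simp
    have hget : ((List.range n).map (fun i => F i (m.getD i [])) ++ m.drop n).getD n []
        = m.getD n [] := by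
      rw [List.getD_eq_getElem?_getD, List.getElem?_append_right (by omega), hlen, Nat.sub_self,
        List.getElem?_drop, Nat.add_zero, ← List.getD_eq_getElem?_getD]
    rw [hget, List.set_append_right _ _ (by omega), hlen, Nat.sub_self,
      List.drop_eq_getElem_cons (show n < m.length by omega), List.set_cons_zero]
    simp


-- the 1D selection pass, structurally
def pvPassS : (Int × Int) → List (Int × Int) → (Int × Int) × List (Int × Int)
  | m, [] => (m, [])
  | m, x :: xs =>
    if m.1 ≤ x.1 then ((pvPassS x xs).1, m :: (pvPassS x xs).2)
    else ((pvPassS m xs).1, x :: (pvPassS m xs).2)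

theorem pvPassS_len (m : Int × Int) (xs : List (Int × Int)) :
    (pvPassS m xs).2.length = xs.length := by
  induction xs generalizing m with
  | nil => rfl
  | cons x t ih => unfold pvPassS; split_ifs <;> simp [ih]

def pvSortS : List (Int × Int) → List (Int × Int)
  | [] => []
  | m :: xs => (pvPassS m xs).1 :: pvSortS (pvPassS m xs).2
termination_by l => l.length
decreasing_by simp [pvPassS_len]

def pvLexGt (a b : Int × Int) : Prop := b.1 < a.1 ∨ (b.1 = a.1 ∧ b.2 < a.2)

def pvJ (l : List (Int × Int)) : Prop := l.Pairwise (fun a b => a.1 = b.1 → a.2 < b.2)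

theorem pvPassS_spec (xs : List (Int × Int)) : ∀ (m : Int × Int), pvJ (m :: xs) →
    ((pvPassS m xs).1 :: (pvPassS m xs).2).Perm (m :: xs) ∧
    (∀ y ∈ (pvPassS m xs).2, pvLexGt (pvPassS m xs).1 y) ∧
    pvJ (pvPassS m xs).2 := by
  induction xs with
  | nil => intro m _; exact ⟨List.Perm.refl _, by simp [pvPassS], List.Pairwise.nil⟩
  | cons x xs ih =>
    intro m hJ
    have hmhead : ∀ y ∈ x :: xs, m.1 = y.1 → m.2 < y.2 := (List.pairwise_cons.mp hJ).1
    have hJx : pvJ (x :: xs) := hJ.of_cons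
    have hJm : pvJ (m :: xs) :=
      List.pairwise_cons.mpr ⟨fun y hy => hmhead y (by simp [hy]), hJx.of_cons⟩
    have hxhead : ∀ y ∈ xs, x.1 = y.1 → x.2 < y.2 := (List.pairwise_cons.mp hJx).1
    have hmx1 : m.1 = x.1 → m.2 < x.2 := hmhead x (by simp)
    unfold pvPassS
    by_cases hc : m.1 ≤ x.1
    · simp only [if_pos hc]
      obtain ⟨hperm, hmax, hJ'⟩ := ih x hJx
      refine ⟨(List.Perm.swap m (pvPassS x xs).1 (pvPassS x xs).2).trans (hperm.cons m), ?_, ?_⟩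
      · intro y hy
        rcases List.mem_cons.mp hy with hy | hy
        · subst hy
          have hx : x ∈ (pvPassS x xs).1 :: (pvPassS x xs).2 :=
            (hperm.mem_iff).mpr (by simp)
          rcases List.mem_cons.mp hx with hx | hx
          · rw [← hx]; unfold pvLexGt
            rcases lt_or_eq_of_le hc with h | h
            · exact Or.inl h
            · exact Or.inr ⟨h, hmx1 h⟩
          · have := hmax x hx
            unfold pvLexGt at this ⊢
            rcases this with h | h
            · exact Or.inl (by omega)
            · rcases lt_or_eq_of_le hc with h2 | h2
              · exact Or.inl (by omega)
              · exact Or.inr ⟨by omega, by have := hmx1 h2; omega⟩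
        · exact hmax y hy
      · refine List.pairwise_cons.mpr ⟨fun y hy => ?_, hJ'⟩
        have : y ∈ x :: xs := (hperm.mem_iff).mp (by simp [hy])
        exact hmhead y this
    · simp only [if_neg hc]
      have hxm : x.1 < m.1 := by omega
      obtain ⟨hperm, hmax, hJ'⟩ := ih m hJm
      refine ⟨((List.Perm.swap x (pvPassS m xs).1 (pvPassS m xs).2).trans
        (hperm.cons x)).trans (List.Perm.swap m x xs), ?_, ?_⟩
      · intro y hy
        rcases List.mem_cons.mp hy with hy | hy
        · subst hy
          have hm : m ∈ (pvPassS m xs).1 :: (pvPassS m xs).2 :=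
            (hperm.mem_iff).mpr (by simp)
          rcases List.mem_cons.mp hm with hm | hm
          · rw [← hm]; exact Or.inl hxm
          · have := hmax m hm
            unfold pvLexGt at this ⊢
            exact Or.inl (by omega)
        · exact hmax y hy
      · refine List.pairwise_cons.mpr ⟨fun y hy => ?_, hJ'⟩
        have hmem : y ∈ m :: xs := (hperm.mem_iff).mp (by simp [hy])
        rcases List.mem_cons.mp hmem with h | h
        · subst h; intro he; omega
        · exact hxhead y h

theorem pvSortS_spec : ∀ (n : Nat) (l : List (Int × Int)), l.length ≤ n → pvJ l →
    (pvSortS l).Perm l ∧ (pvSortS l).Pairwise pvLexGt := by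
  intro n
  induction n with
  | zero =>
    intro l hl _
    have : l = [] := List.eq_nil_of_length_eq_zero (by omega)
    subst this
    exact ⟨by simp [pvSortS], by simp [pvSortS]⟩
  | succ n ih =>
    intro l hl hJ
    match l with
    | [] => exact ⟨by simp [pvSortS], by simp [pvSortS]⟩
    | m :: xs =>
      obtain ⟨hperm, hmax, hJ'⟩ := pvPassS_spec xs m hJ
      have hlen : (pvPassS m xs).2.length ≤ n := by
        rw [pvPassS_len]; simpa using hl
      obtain ⟨hperm2, hpw⟩ := ih _ hlen hJ'
      rw [pvSortS]
      refine ⟨(hperm2.cons _).trans hperm, List.pairwise_cons.mpr ⟨fun y hy => ?_, hpw⟩⟩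
      exact hmax y ((hperm2.mem_iff).mp hy)

-- index-based swap loops compute the structural pass
def pvSwap (l : List (Int × Int)) (i z : Nat) : List (Int × Int) :=
  (l.set z (l.getD i (0, 0))).set i (l.getD z (0, 0))

def pvPassB (n i : Nat) (l : List (Int × Int)) : List (Int × Int) :=
  (List.range (n - 1 - i)).foldl (fun l k =>
    let z := i + k + 1
    if (l.getD i (0, 0)).1 ≤ (l.getD z (0, 0)).1 then pvSwap l i z else l) l

theorem pvPassB_gen (pre : List (Int × Int)) :
    ∀ (suf done : List (Int × Int)) (m : Int × Int),
    (List.range suf.length).foldl (fun l k =>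
        let z := pre.length + done.length + k + 1
        if (l.getD pre.length (0, 0)).1 ≤ (l.getD z (0, 0)).1 then pvSwap l pre.length z else l)
      (pre ++ m :: done ++ suf)
    = pre ++ (pvPassS m suf).1 :: done ++ (pvPassS m suf).2 := by
  intro suf
  induction suf with
  | nil => intro done m; simp [pvPassS]
  | cons x suf ih =>
    intro done m
    rw [List.length_cons, List.range_succ_eq_map, List.foldl_cons, List.foldl_map]
    have hgm : ((pre ++ m :: done ++ x :: suf).getD pre.length (0,0)) = m := by
      have : pre ++ m :: done ++ x :: suf = pre ++ m :: (done ++ x :: suf) := by simp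
      rw [this, pvGetD_append_len]
    
    have hassoc : pre ++ m :: done ++ x :: suf = (pre ++ m :: done) ++ x :: suf := by simp
    have hlpmd : (pre ++ m :: done).length = pre.length + done.length + 1 := by
      simp only [List.length_append, List.length_cons]; omega
    have hgx : ((pre ++ m :: done ++ x :: suf).getD (pre.length + done.length + 0 + 1) (0,0)) = x := by
      rw [hassoc, show pre.length + done.length + 0 + 1 = (pre ++ m :: done).length by omega,
        pvGetD_append_len]
    simp only [hgm, hgx]
    by_cases hc : m.1 ≤ x.1
    · rw [if_pos hc]
      have hsw : pvSwap (pre ++ m :: done ++ x :: suf) pre.length (pre.length + done.length + 0 + 1)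
          = pre ++ x :: done ++ m :: suf := by
        unfold pvSwap
        simp only [hgm, hgx]
        have h1 : (pre ++ m :: done ++ x :: suf).set (pre.length + done.length + 0 + 1) m
            = pre ++ m :: done ++ m :: suf := by
          rw [hassoc, show pre.length + done.length + 0 + 1 = (pre ++ m :: done).length by omega,
            pvSet_append_len]
        rw [h1]
        have hmid : pre ++ m :: done ++ m :: suf = pre ++ m :: (done ++ m :: suf) := by simp

        rw [hmid, pvSet_append_len]
        simp
      rw [hsw]
      simp only [Nat.succ_eq_add_one]
      refine Eq.trans (PySem.List.foldl_congr_mem _ _ (fun l k =>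
          if (l.getD pre.length (0, 0)).1 ≤ (l.getD (pre.length + (done ++ [m]).length + k + 1) (0, 0)).1
          then pvSwap l pre.length (pre.length + (done ++ [m]).length + k + 1) else l) _
        (fun acc k _ => by
          have hz : pre.length + done.length + (k + 1) + 1 = pre.length + (done ++ [m]).length + k + 1 := by
            simp only [List.length_append, List.length_cons, List.length_nil]; omega
          simp only [hz])) ?_
      have hre : pre ++ x :: done ++ m :: suf = pre ++ x :: (done ++ [m]) ++ suf := by simp
      rw [hre, ih (done ++ [m]) x]
      have hps : pvPassS m (x :: suf) = ((pvPassS x suf).1, m :: (pvPassS x suf).2) := by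
        rw [pvPassS, if_pos hc]
      rw [hps]
      simp
    · rw [if_neg hc]
      simp only [Nat.succ_eq_add_one]
      refine Eq.trans (PySem.List.foldl_congr_mem _ _ (fun l k =>
          if (l.getD pre.length (0, 0)).1 ≤ (l.getD (pre.length + (done ++ [x]).length + k + 1) (0, 0)).1
          then pvSwap l pre.length (pre.length + (done ++ [x]).length + k + 1) else l) _
        (fun acc k _ => by
          have hz : pre.length + done.length + (k + 1) + 1 = pre.length + (done ++ [x]).length + k + 1 := by
            simp only [List.length_append, List.length_cons, List.length_nil]; omega
          simp only [hz])) ?_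
      have hre : pre ++ m :: done ++ x :: suf = pre ++ m :: (done ++ [x]) ++ suf := by simp
      rw [hre, ih (done ++ [x]) m]
      have hps : pvPassS m (x :: suf) = ((pvPassS m suf).1, x :: (pvPassS m suf).2) := by
        rw [pvPassS, if_neg hc]
      rw [hps]
      simp

theorem pvSortB_gen :
    ∀ (cnt : Nat) (pre l : List (Int × Int)), l.length = cnt + 1 →
      (List.range' pre.length cnt 1).foldl
        (fun l' i => pvPassB (pre.length + cnt + 1) i l') (pre ++ l)
      = pre ++ pvSortS l := by
  intro cnt
  induction cnt with
  | zero =>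
    intro pre l hl
    match l, hl with
    | [m], _ => simp [pvSortS, pvPassS]
  | succ cnt ih =>
    intro pre l hl
    match l with
    | m :: suf =>
      have hsuf : suf.length = cnt + 1 := by simpa using hl
      rw [List.range'_succ, List.foldl_cons]
      have hpass : pvPassB (pre.length + (cnt + 1) + 1) pre.length (pre ++ m :: suf)
          = pre ++ (pvPassS m suf).1 :: (pvPassS m suf).2 := by
        unfold pvPassB
        have hn : pre.length + (cnt + 1) + 1 - 1 - pre.length = suf.length := by omega
        rw [hn]
        have := pvPassB_gen pre suf [] m
        simpa using this
      rw [hpass]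
      have hre : pre ++ (pvPassS m suf).1 :: (pvPassS m suf).2
          = (pre ++ [(pvPassS m suf).1]) ++ (pvPassS m suf).2 := by simp
      have hlen2 : (pvPassS m suf).2.length = cnt + 1 := by rw [pvPassS_len, hsuf]
      have harith : pre.length + (cnt + 1) + 1 = (pre ++ [(pvPassS m suf).1]).length + cnt + 1 := by
        simp only [List.length_append, List.length_cons, List.length_nil]; omega
      rw [hre, harith]
      have hstart : (pre ++ [(pvPassS m suf).1]).length = pre.length + 1 := by simp
      rw [← hstart, ih (pre ++ [(pvPassS m suf).1]) (pvPassS m suf).2 hlen2]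
      rw [pvSortS]
      simp

-- sorted() with a tuple key, and prefix-writing folds
-- Python's tuple key (k1, k2) is the lexicographic product order
theorem pvSorted2_eq_sorted_lex {α : Type} (xs : List α) (k1 k2 : α → Int) (rev : Bool) :
    PySem.List.sorted2 xs k1 k2 rev
      = PySem.List.sorted xs (fun a => toLex (k1 a, k2 a)) rev := by
  unfold PySem.List.sorted2 PySem.List.sorted
  have hlt : (fun a b => decide (k1 a < k1 b) || (!decide (k1 b < k1 a) && decide (k2 a < k2 b)))
      = fun a b => decide ((fun a => toLex (k1 a, k2 a)) a < (fun a => toLex (k1 a, k2 a)) b) := by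
    funext a b
    simp only [Prod.Lex.lt_iff]
    by_cases h1 : k1 a < k1 b <;> by_cases h2 : k1 b < k1 a <;> by_cases h3 : k2 a < k2 b <;>
      simp [h1, h2, h3] <;> omega
  rw [hlt]

theorem pvSorted2_rev_eq_of_perm_of_pairwise {α : Type} (xs ys : List α) (k1 k2 : α → Int)
    (hp : ys.Perm xs)
    (hpw : ys.Pairwise (fun a b => k1 b < k1 a ∨ (k1 b = k1 a ∧ k2 b < k2 a))) :
    PySem.List.sorted2 xs k1 k2 true = ys := by
  rw [pvSorted2_eq_sorted_lex]
  apply PySem.List.sorted_rev_eq_of_perm_of_pairwise_gt xs ys _ hp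
  apply hpw.imp
  intro a b h
  simp only [Prod.Lex.lt_iff]
  rcases h with h | h
  · exact Or.inl h
  · exact Or.inr ⟨h.1, h.2⟩

-- writing the enumerate-indexed values fills the prefix
theorem pvEnumSet : ∀ (os : List Int) (pre c : List Int), os.length ≤ c.length →
    (PySem.List.enumerate os (pre.length : Int)).foldl
      (fun acc p => acc.set p.1.toNat p.2) (pre ++ c)
    = pre ++ os ++ c.drop os.length := by
  intro os
  induction os with
  | nil => simp
  | cons o os ih =>
    intro pre c hlen
    rw [PySem.List.enumerate_cons, List.foldl_cons]
    match c, hlen with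
    | c0 :: c', hlen =>
      have hset : (pre ++ c0 :: c').set (pre.length : Int).toNat o = pre ++ o :: c' := by
        rw [Int.toNat_natCast, List.set_append_right _ _ (Nat.le_refl _), Nat.sub_self,
          List.set_cons_zero]
      rw [hset]
      have hpre : ((pre.length : Int) + 1) = ((pre ++ [o]).length : Int) := by simp
      have hre : pre ++ o :: c' = (pre ++ [o]) ++ c' := by simp
      rw [hpre, hre, ih (pre ++ [o]) c' (by simpa using hlen)]
      simp

-- matrix fold of single-column writes seen through pvColOf
theorem pvFoldl_set2_col {ι : Type} {np p0 : Nat} (j : Nat) (hj : j < p0)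
    (pos : ι → Nat) (val : ι → Int) :
    ∀ (l : List ι) (m : List (List Int)), pvShape m np p0 →
      pvShape (l.foldl (fun m x => pvSet2 m (pos x) j (val x)) m) np p0 ∧
      (∀ j', j' ≠ j → pvColOf (l.foldl (fun m x => pvSet2 m (pos x) j (val x)) m) j' = pvColOf m j') ∧
      pvColOf (l.foldl (fun m x => pvSet2 m (pos x) j (val x)) m) j
        = l.foldl (fun c x => c.set (pos x) (val x)) (pvColOf m j) := by
  intro l
  induction l with
  | nil => intro m hm; exact ⟨hm, fun _ _ => rfl, rfl⟩
  | cons x t ih =>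
    intro m hm
    have hm' := pvShape_set2 (pos x) j (val x) hm
    obtain ⟨hs, ho, hc⟩ := ih _ hm'
    refine ⟨hs, fun j' hj' => ?_, ?_⟩
    · rw [List.foldl_cons, ho j' hj', pvColOf_set2_ne _ _ _ hj']
    · rw [List.foldl_cons, List.foldl_cons, hc, pvColOf_set2_self hm _ _ hj]

-- ===== phase characterizations =====
-- the element-by-element copy loop builds the nc-column truncation of src
theorem pvCopyPhase (src : List (List Int)) (nr nc : Nat) (_hnr : nr = src.length) :
    (List.range nr).foldl (fun m i => (List.range nc).foldl (fun m j => pvSet2 m i j (pvGet2 src i j)) m)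
        ((List.range nr).map (fun _ => (List.range nc).map (fun _ => (0 : Int))))
      = (List.range nr).map (fun i => (List.range nc).map (fun j => pvGet2 src i j)) := by
  have hbody : ∀ (m : List (List Int)) (i : Nat), i ∈ List.range nr →
      (fun m i => (List.range nc).foldl (fun m j => pvSet2 m i j (pvGet2 src i j)) m) m i
      = (fun m i => m.set i ((List.range nc).foldl (fun r j => r.set j (pvGet2 src i j)) (m.getD i []))) m i := by
    intro m i _
    exact pvFoldl_set_row (List.range nc) i (fun r j => r.set j (pvGet2 src i j)) m
  rw [PySem.List.foldl_congr_mem _ _ _ _ hbody,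
    pvMatCopy (fun i r => (List.range nc).foldl (fun r j => r.set j (pvGet2 src i j)) r) nr _ (by simp)]
  have hdrop : (((List.range nr).map (fun _ => (List.range nc).map (fun _ => (0 : Int)))).drop nr) = [] := by
    apply List.drop_eq_nil_of_le; simp
  rw [hdrop, List.append_nil]
  apply List.map_congr_left
  intro i hi
  have hi' : i < nr := List.mem_range.mp hi
  have hrow : ((List.range nr).map (fun _ => (List.range nc).map (fun _ => (0 : Int)))).getD i []
      = (List.range nc).map (fun _ => (0 : Int)) := PySem.List.getD_map_range _ _ _ _ hi'
  rw [hrow, pvSetAll (fun j => pvGet2 src i j) nc _ (by simp)]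
  simp

-- columns of a map-of-maps matrix
theorem pvColOf_map_map (F : Nat → Nat → Int) (nr nc j : Nat) (hj : j < nc) :
    pvColOf ((List.range nr).map (fun i => (List.range nc).map (F i))) j
      = (List.range nr).map (fun i => F i j) := by
  unfold pvColOf
  rw [List.map_map]
  apply List.map_congr_left
  intro i _
  simp only [Function.comp]
  exact PySem.List.getD_map_range _ _ _ _ hj

theorem pvShape_map_map (g : Nat → Nat → Int) (nr nc : Nat) :
    pvShape ((List.range nr).map (fun i => (List.range nc).map (g i))) nr nc := by
  constructor
  · simp
  · intro r hr
    obtain ⟨i, _, rfl⟩ := List.mem_map.mp hr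
    simp

theorem pvColOf_zeros (np p0 j : Nat) :
    pvColOf ((List.range np).map (fun _ => (List.range p0).map (fun _ => (0 : Int)))) j
      = List.replicate np (0 : Int) := by
  unfold pvColOf
  rw [List.map_map]
  have : ∀ i ∈ List.range np,
      (((fun r => r.getD j 0) ∘ fun _ => (List.range p0).map (fun _ => (0:Int)))) i = (0 : Int) := by
    intro i _
    simp only [Function.comp]
    by_cases hj : j < p0
    · exact PySem.List.getD_map_range _ _ _ _ hj
    · apply List.getD_eq_default; simp; omega
  rw [List.map_congr_left this, List.map_const', List.length_range]

-- the numbering loop's running counter equals the row index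
theorem pvCounterElim (j : Nat) : ∀ (n : Nat) (ps : List (List Int)) (c : Int),
    ((List.range n).foldl (fun (st : List (List Int) × Int) i => (pvSet2 st.1 i j st.2, st.2 + 1)) (ps, c))
      = ((List.range n).foldl (fun ps i => pvSet2 ps i j ((i : Int) + c)) ps, c + n) := by
  intro n
  induction n with
  | zero => intro ps c; simp
  | succ n ih =>
    intro ps c
    rw [List.range_succ, List.foldl_append, List.foldl_append, ih ps c]
    simp only [List.foldl_cons, List.foldl_nil, Prod.mk.injEq]
    refine ⟨by rw [Int.add_comm], by push_cast; ring⟩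

-- the numbering phase: every column < nc becomes 0,1,…,nr-1 followed by zeros
theorem pvNumPhase (np p0 nr nc : Nat) (hnp : nr ≤ np) (hp0 : nc ≤ p0) :
    pvShape ((List.range nc).foldl (fun ps j => ((List.range nr).foldl
        (fun (st : List (List Int) × Int) i => (pvSet2 st.1 i j st.2, st.2 + 1)) (ps, (0:Int))).1)
        ((List.range np).map (fun _ => (List.range p0).map (fun _ => (0:Int))))) np p0 ∧
    ∀ j, pvColOf ((List.range nc).foldl (fun ps j => ((List.range nr).foldl
        (fun (st : List (List Int) × Int) i => (pvSet2 st.1 i j st.2, st.2 + 1)) (ps, (0:Int))).1)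
        ((List.range np).map (fun _ => (List.range p0).map (fun _ => (0:Int))))) j
      = if j < nc then (List.range nr).map (fun i => Int.ofNat i) ++ List.replicate (np - nr) (0:Int)
        else List.replicate np (0 : Int) := by
  have hstep : ∀ (ps : List (List Int)) (j : Nat), pvShape ps np p0 → j < nc →
      pvShape (((List.range nr).foldl (fun (st : List (List Int) × Int) i =>
          (pvSet2 st.1 i j st.2, st.2 + 1)) (ps, (0:Int))).1) np p0 ∧
      (∀ j', j' ≠ j → pvColOf (((List.range nr).foldl (fun (st : List (List Int) × Int) i =>
          (pvSet2 st.1 i j st.2, st.2 + 1)) (ps, (0:Int))).1) j' = pvColOf ps j') ∧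
      pvColOf (((List.range nr).foldl (fun (st : List (List Int) × Int) i =>
          (pvSet2 st.1 i j st.2, st.2 + 1)) (ps, (0:Int))).1) j
        = (List.range nr).map (fun i => Int.ofNat i) ++ (pvColOf ps j).drop nr := by
    intro ps j hshape hj
    rw [pvCounterElim j nr ps 0]
    have hcongr : ∀ (m : List (List Int)) (i : Nat), i ∈ List.range nr →
        (fun ps i => pvSet2 ps i j ((i : Int) + 0)) m i
        = (fun ps i => pvSet2 ps i j (i : Int)) m i := by
      intro m i _; simp
    rw [PySem.List.foldl_congr_mem _ _ _ _ hcongr]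
    obtain ⟨hs, ho, hc⟩ := pvFoldl_set2_col j (by omega) (fun i => i) (fun i => (i : Int))
      (List.range nr) ps hshape
    refine ⟨hs, ho, ?_⟩
    rw [hc, pvSetAll (fun i => (i : Int)) nr _ (by rw [pvLen_colOf, hshape.1]; omega)]
    simp [Int.ofNat_eq_natCast]
  obtain ⟨hs, hcols⟩ := pvCol_fold (fun m => pvShape m np p0) pvColOf
    (fun ps j => ((List.range nr).foldl (fun (st : List (List Int) × Int) i =>
      (pvSet2 st.1 i j st.2, st.2 + 1)) (ps, (0:Int))).1)
    (fun _ c => (List.range nr).map (fun i => Int.ofNat i) ++ c.drop nr)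
    (fun j => j < nc) hstep
    (List.range nc) List.nodup_range (fun j hj => List.mem_range.mp hj) _
    (pvShape_map_map (fun _ _ => (0:Int)) np p0)
  refine ⟨hs, fun j => ?_⟩
  rw [hcols j, pvColOf_zeros]
  by_cases hj : j < nc
  · simp only [List.mem_range, hj, if_true, List.drop_replicate]
  · simp only [List.mem_range, hj, if_false]

-- relation between the matrix pair and the abstract (value, seq) pair list of column j
def pvRel (nr nc np p0 j : Nat) (st0 a : List (List Int) × List (List Int))
    (p : List (Int × Int)) : Prop :=
  (pvShape a.1 nr nc ∧ pvShape a.2 np p0) ∧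
  (∀ j', j' ≠ j → pvColOf a.1 j' = pvColOf st0.1 j' ∧ pvColOf a.2 j' = pvColOf st0.2 j') ∧
  (pvColOf a.2 j).drop nr = (pvColOf st0.2 j).drop nr ∧
  (pvColOf a.1 j).zip ((pvColOf a.2 j).take nr) = p

-- one swap-scan step preserves the relation, tracking max = itemArr[i][j]
theorem pvInnerStep (nr nc np p0 j i : Nat) (hnp : nr ≤ np) (hj : j < nc) (hncp : nc ≤ p0)
    (st0 : List (List Int) × List (List Int)) (k : Nat) (hk : k < nr - 1 - i)
    (st2 : Int × List (List Int) × List (List Int)) (q : List (Int × Int))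
    (hR : pvRel nr nc np p0 j st0 st2.2 q) (hmx : st2.1 = pvGet2 st2.2.1 i j) :
    pvRel nr nc np p0 j st0
      ((fun (st2 : Int × List (List Int) × List (List Int)) k =>
        let z := i + k + 1
        if st2.1 ≤ pvGet2 st2.2.1 z j then
          let mx := pvGet2 st2.2.1 z j
          let ia := pvSet2 st2.2.1 z j (pvGet2 st2.2.1 i j)
          let ia := pvSet2 ia i j mx
          let t := pvGet2 st2.2.2 z j
          let ps := pvSet2 st2.2.2 z j (pvGet2 st2.2.2 i j)
          let ps := pvSet2 ps i j t
          (mx, ia, ps)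
        else st2) st2 k).2
      ((fun (q : List (Int × Int)) k =>
        let z := i + k + 1
        if (q.getD i (0, 0)).1 ≤ (q.getD z (0, 0)).1 then pvSwap q i z else q) q k) ∧
    ((fun (st2 : Int × List (List Int) × List (List Int)) k =>
        let z := i + k + 1
        if st2.1 ≤ pvGet2 st2.2.1 z j then
          let mx := pvGet2 st2.2.1 z j
          let ia := pvSet2 st2.2.1 z j (pvGet2 st2.2.1 i j)
          let ia := pvSet2 ia i j mx
          let t := pvGet2 st2.2.2 z j
          let ps := pvSet2 st2.2.2 z j (pvGet2 st2.2.2 i j)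
          let ps := pvSet2 ps i j t
          (mx, ia, ps)
        else st2) st2 k).1
      = pvGet2 ((fun (st2 : Int × List (List Int) × List (List Int)) k =>
        let z := i + k + 1
        if st2.1 ≤ pvGet2 st2.2.1 z j then
          let mx := pvGet2 st2.2.1 z j
          let ia := pvSet2 st2.2.1 z j (pvGet2 st2.2.1 i j)
          let ia := pvSet2 ia i j mx
          let t := pvGet2 st2.2.2 z j
          let ps := pvSet2 st2.2.2 z j (pvGet2 st2.2.2 i j)
          let ps := pvSet2 ps i j t
          (mx, ia, ps)
        else st2) st2 k).2.1 i j := by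
  obtain ⟨⟨hsh1, hsh2⟩, hoth, hdrop, hzip⟩ := hR
  have hz : i + k + 1 < nr := by omega
  have hi : i < nr := by omega
  have hcv : (pvColOf st2.2.1 j).length = nr := by rw [pvLen_colOf, hsh1.1]
  have hcs : (pvColOf st2.2.2 j).length = np := by rw [pvLen_colOf, hsh2.1]
  have htk : ((pvColOf st2.2.2 j).take nr).length = nr := by
    rw [List.length_take, hcs]; omega
  have hqi : q.getD i (0, 0)
      = ((pvColOf st2.2.1 j).getD i 0, ((pvColOf st2.2.2 j).take nr).getD i 0) := by
    rw [← hzip]; exact pvZip_getD _ _ _ (by omega) (by omega)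
  have hqz : q.getD (i + k + 1) (0, 0)
      = ((pvColOf st2.2.1 j).getD (i + k + 1) 0, ((pvColOf st2.2.2 j).take nr).getD (i + k + 1) 0) := by
    rw [← hzip]; exact pvZip_getD _ _ _ (by omega) (by omega)
  have hqi1 : (q.getD i (0, 0)).1 = pvGet2 st2.2.1 i j := by
    rw [hqi, pvGet2_colOf]
  have hqz1 : (q.getD (i + k + 1) (0, 0)).1 = pvGet2 st2.2.1 (i + k + 1) j := by
    rw [hqz, pvGet2_colOf]
  dsimp only
  by_cases hcond : st2.1 ≤ pvGet2 st2.2.1 (i + k + 1) j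
  · rw [if_pos hcond, if_pos (by rw [hqi1, hqz1, ← hmx]; exact hcond)]
    -- the four written matrices
    have hshANew : pvShape (pvSet2 (pvSet2 st2.2.1 (i+k+1) j (pvGet2 st2.2.1 i j)) i j
        (pvGet2 st2.2.1 (i+k+1) j)) nr nc := pvShape_set2 _ _ _ (pvShape_set2 _ _ _ hsh1)
    have hshBNew : pvShape (pvSet2 (pvSet2 st2.2.2 (i+k+1) j (pvGet2 st2.2.2 i j)) i j
        (pvGet2 st2.2.2 (i+k+1) j)) np p0 := pvShape_set2 _ _ _ (pvShape_set2 _ _ _ hsh2)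
    have hcolA : pvColOf (pvSet2 (pvSet2 st2.2.1 (i+k+1) j (pvGet2 st2.2.1 i j)) i j
        (pvGet2 st2.2.1 (i+k+1) j)) j
        = ((pvColOf st2.2.1 j).set (i+k+1) ((pvColOf st2.2.1 j).getD i 0)).set i
            ((pvColOf st2.2.1 j).getD (i+k+1) 0) := by
      rw [pvColOf_set2_self (pvShape_set2 _ _ _ hsh1) _ _ hj,
        pvColOf_set2_self hsh1 _ _ hj, pvGet2_colOf, pvGet2_colOf]
    have hcolB : pvColOf (pvSet2 (pvSet2 st2.2.2 (i+k+1) j (pvGet2 st2.2.2 i j)) i j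
        (pvGet2 st2.2.2 (i+k+1) j)) j
        = ((pvColOf st2.2.2 j).set (i+k+1) ((pvColOf st2.2.2 j).getD i 0)).set i
            ((pvColOf st2.2.2 j).getD (i+k+1) 0) := by
      rw [pvColOf_set2_self (pvShape_set2 _ _ _ hsh2) _ _ (by omega),
        pvColOf_set2_self hsh2 _ _ (by omega), pvGet2_colOf, pvGet2_colOf]
    refine ⟨⟨⟨hshANew, hshBNew⟩, ?_, ?_, ?_⟩, ?_⟩
    · intro j' hj'
      constructor
      · rw [pvColOf_set2_ne _ _ _ hj', pvColOf_set2_ne _ _ _ hj']; exact (hoth j' hj').1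
      · rw [pvColOf_set2_ne _ _ _ hj', pvColOf_set2_ne _ _ _ hj']; exact (hoth j' hj').2
    · rw [hcolB, pvDrop_set _ _ _ _ hi, pvDrop_set _ _ _ _ hz]; exact hdrop
    · rw [hcolA, hcolB]
      rw [pvTake_set _ _ _ _ hi, pvTake_set _ _ _ _ hz,
        pvZip_set, pvZip_set, hzip]
      have e1 : ((pvColOf st2.2.1 j).getD i 0, ((pvColOf st2.2.2 j).take nr).getD i 0)
          = q.getD i (0, 0) := hqi.symm
      have e2 : ((pvColOf st2.2.1 j).getD (i+k+1) 0, ((pvColOf st2.2.2 j).take nr).getD (i+k+1) 0)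
          = q.getD (i+k+1) (0, 0) := hqz.symm
      have e3 : ((pvColOf st2.2.2 j).take nr).getD i 0 = (pvColOf st2.2.2 j).getD i 0 :=
        pvTake_getD _ _ _ hi
      have e4 : ((pvColOf st2.2.2 j).take nr).getD (i+k+1) 0 = (pvColOf st2.2.2 j).getD (i+k+1) 0 :=
        pvTake_getD _ _ _ hz
      rw [← e3, ← e4, e1, e2]
      rfl
    · dsimp only
      rw [pvGet2_colOf (pvSet2 (pvSet2 st2.2.1 (i+k+1) j (pvGet2 st2.2.1 i j)) i j
          (pvGet2 st2.2.1 (i+k+1) j)) i j, hcolA,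
        pvGetD_set_self _ _ _ (by rw [List.length_set]; omega)]
      exact pvGet2_colOf _ _ _
  · rw [if_neg hcond, if_neg (by rw [hqi1, hqz1, ← hmx]; exact hcond)]
    exact ⟨⟨⟨hsh1, hsh2⟩, hoth, hdrop, hzip⟩, hmx⟩

-- the A port's per-column double loop, named for the proofs
def pvStepAI (nr j : Nat) (st : List (List Int) × List (List Int)) (i : Nat) :
    List (List Int) × List (List Int) :=
  let r := (List.range (nr - 1 - i)).foldl
    (fun (st2 : Int × List (List Int) × List (List Int)) k =>
      let z := i + k + 1
      if st2.1 ≤ pvGet2 st2.2.1 z j then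
        let mx := pvGet2 st2.2.1 z j
        let ia := pvSet2 st2.2.1 z j (pvGet2 st2.2.1 i j)
        let ia := pvSet2 ia i j mx
        let t := pvGet2 st2.2.2 z j
        let ps := pvSet2 st2.2.2 z j (pvGet2 st2.2.2 i j)
        let ps := pvSet2 ps i j t
        (mx, ia, ps)
      else st2)
    (pvGet2 st.1 i j, st.1, st.2)
  (r.2.1, r.2.2)

def pvStepA (nr j : Nat) (st : List (List Int) × List (List Int)) :
    List (List Int) × List (List Int) :=
  (List.range (nr - 1)).foldl (pvStepAI nr j) st

-- the per-column result of the selection sort, as a function of the column pair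
def pvTSort (nr : Nat) (c : List Int × List Int) : List Int × List Int :=
  ((pvSortS (c.1.zip (c.2.take nr))).map Prod.fst,
   (pvSortS (c.1.zip (c.2.take nr))).map Prod.snd ++ c.2.drop nr)

-- one column's double loop: shapes kept, other columns kept, column j sorted
theorem pvSortStep (nr nc np p0 : Nat) (hnp : nr ≤ np) (hncp : nc ≤ p0)
    (st : List (List Int) × List (List Int)) (j : Nat)
    (hsh : pvShape st.1 nr nc ∧ pvShape st.2 np p0) (hj : j < nc) :
    (pvShape (pvStepA nr j st).1 nr nc ∧ pvShape (pvStepA nr j st).2 np p0) ∧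
    (∀ j', j' ≠ j → (pvColOf (pvStepA nr j st).1 j', pvColOf (pvStepA nr j st).2 j')
      = (pvColOf st.1 j', pvColOf st.2 j')) ∧
    (pvColOf (pvStepA nr j st).1 j, pvColOf (pvStepA nr j st).2 j)
      = pvTSort nr (pvColOf st.1 j, pvColOf st.2 j) := by
  have hcv : (pvColOf st.1 j).length = nr := by rw [pvLen_colOf, hsh.1.1]
  have hcs : (pvColOf st.2 j).length = np := by rw [pvLen_colOf, hsh.2.1]
  have hp0len : ((pvColOf st.1 j).zip ((pvColOf st.2 j).take nr)).length = nr := by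
    rw [List.length_zip, hcv, List.length_take, hcs]; omega
  have houter : ∀ (i : Nat), i ∈ List.range (nr - 1) →
      ∀ (a : List (List Int) × List (List Int)) (p : List (Int × Int)),
        pvRel nr nc np p0 j st a p →
        pvRel nr nc np p0 j st (pvStepAI nr j a i) (pvPassB nr i p) := by
    intro i hi a p hR
    have hinner := pvFoldl_sim
      (fun (st2 : Int × List (List Int) × List (List Int)) (q : List (Int × Int)) =>
        pvRel nr nc np p0 j st st2.2 q ∧ st2.1 = pvGet2 st2.2.1 i j)
      (fun (st2 : Int × List (List Int) × List (List Int)) k =>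
        let z := i + k + 1
        if st2.1 ≤ pvGet2 st2.2.1 z j then
          let mx := pvGet2 st2.2.1 z j
          let ia := pvSet2 st2.2.1 z j (pvGet2 st2.2.1 i j)
          let ia := pvSet2 ia i j mx
          let t := pvGet2 st2.2.2 z j
          let ps := pvSet2 st2.2.2 z j (pvGet2 st2.2.2 i j)
          let ps := pvSet2 ps i j t
          (mx, ia, ps)
        else st2)
      (fun (q : List (Int × Int)) k =>
        let z := i + k + 1
        if (q.getD i (0, 0)).1 ≤ (q.getD z (0, 0)).1 then pvSwap q i z else q)
      (List.range (nr - 1 - i)) (pvGet2 a.1 i j, a.1, a.2) p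
      ⟨hR, rfl⟩
      (fun k hk st2 q hh =>
        pvInnerStep nr nc np p0 j i hnp hj hncp st k (List.mem_range.mp hk) st2 q hh.1 hh.2)
    exact hinner.1
  have hsim := pvFoldl_sim (pvRel nr nc np p0 j st) (pvStepAI nr j)
    (fun p i => pvPassB nr i p) (List.range (nr - 1)) st
    ((pvColOf st.1 j).zip ((pvColOf st.2 j).take nr))
    ⟨⟨hsh.1, hsh.2⟩, fun _ _ => ⟨rfl, rfl⟩, rfl, rfl⟩ houter
  have hfold : (List.range (nr - 1)).foldl (fun p i => pvPassB nr i p)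
      ((pvColOf st.1 j).zip ((pvColOf st.2 j).take nr))
      = pvSortS ((pvColOf st.1 j).zip ((pvColOf st.2 j).take nr)) := by
    rcases Nat.eq_zero_or_pos nr with h0 | hpos
    · subst h0
      have : (pvColOf st.1 j).zip ((pvColOf st.2 j).take 0) = [] := by
        apply List.eq_nil_of_length_eq_zero; rw [hp0len]
      rw [this]
      simp [pvSortS]
    · have := pvSortB_gen (nr - 1) [] ((pvColOf st.1 j).zip ((pvColOf st.2 j).take nr))
        (by rw [hp0len]; omega)
      simp only [List.nil_append, List.length_nil] at this
      rw [show (0 + (nr - 1) + 1) = nr by omega] at this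
      rw [List.range_eq_range']
      exact this
  rw [hfold] at hsim
  obtain ⟨⟨hs1, hs2⟩, hoth2, hdrop2, hzip2⟩ := hsim
  have hFdef : pvStepA nr j st = (List.range (nr - 1)).foldl (pvStepAI nr j) st := rfl
  rw [hFdef]
  have hl1 : (pvColOf ((List.range (nr - 1)).foldl (pvStepAI nr j) st).1 j).length = nr := by
    rw [pvLen_colOf, hs1.1]
  have hl2 : (pvColOf ((List.range (nr - 1)).foldl (pvStepAI nr j) st).2 j).length = np := by
    rw [pvLen_colOf, hs2.1]
  have hltk : ((pvColOf ((List.range (nr - 1)).foldl (pvStepAI nr j) st).2 j).take nr).length = nr := by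
    rw [List.length_take, hl2]; omega
  have ha : pvColOf ((List.range (nr - 1)).foldl (pvStepAI nr j) st).1 j
      = (pvSortS ((pvColOf st.1 j).zip ((pvColOf st.2 j).take nr))).map Prod.fst := by
    rw [← hzip2, List.map_fst_zip (by rw [hl1, hltk])]
  have hb : (pvColOf ((List.range (nr - 1)).foldl (pvStepAI nr j) st).2 j).take nr
      = (pvSortS ((pvColOf st.1 j).zip ((pvColOf st.2 j).take nr))).map Prod.snd := by
    rw [← hzip2, List.map_snd_zip (by rw [hl1, hltk])]
  refine ⟨⟨hs1, hs2⟩, ?_, ?_⟩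
  · intro j' hj'
    rw [Prod.mk.injEq]
    exact ⟨(hoth2 j' hj').1, (hoth2 j' hj').2⟩
  · rw [Prod.mk.injEq]
    constructor
    · exact ha
    · rw [← List.take_append_drop nr
        (pvColOf ((List.range (nr - 1)).foldl (pvStepAI nr j) st).2 j), hb, hdrop2]
      rfl

-- B's per-column order list
def pvOrd (itemAr : List (List Int)) (j : Nat) : List Int :=
  PySem.List.sorted2 ((List.range itemAr.length).map (fun i => Int.ofNat i))
    (fun i => pvGet2 itemAr i.toNat j) (fun i => i) true

theorem pvOrd_len (itemAr : List (List Int)) (j : Nat) :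
    (pvOrd itemAr j).length = itemAr.length := by
  unfold pvOrd
  rw [(PySem.List.sorted2_perm _ _ _ _).length_eq]
  simp

-- B's order is exactly the seq column the selection sort produces
theorem pvOrdEq (itemAr : List (List Int)) (j : Nat) :
    pvOrd itemAr j
      = (pvSortS ((List.range itemAr.length).map
          (fun i => (pvGet2 itemAr i j, Int.ofNat i)))).map Prod.snd := by
  have hJ : pvJ ((List.range itemAr.length).map (fun i => (pvGet2 itemAr i j, Int.ofNat i))) := by
    unfold pvJ
    rw [List.pairwise_map]
    apply List.Pairwise.imp _ List.pairwise_lt_range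
    intro a b hab
    intro _
    simpa using hab
  obtain ⟨hperm, hpw⟩ := pvSortS_spec
    ((List.range itemAr.length).map (fun i => (pvGet2 itemAr i j, Int.ofNat i))).length
    ((List.range itemAr.length).map (fun i => (pvGet2 itemAr i j, Int.ofNat i)))
    (Nat.le_refl _) hJ
  have hmem1 : ∀ y ∈ pvSortS ((List.range itemAr.length).map
      (fun i => (pvGet2 itemAr i j, Int.ofNat i))),
      pvGet2 itemAr y.2.toNat j = y.1 := by
    intro y hy
    have : y ∈ (List.range itemAr.length).map (fun i => (pvGet2 itemAr i j, Int.ofNat i)) :=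
      hperm.mem_iff.mp hy
    obtain ⟨i, _, rfl⟩ := List.mem_map.mp this
    simp [Int.ofNat_eq_natCast]
  apply pvSorted2_rev_eq_of_perm_of_pairwise
  · have h1 := hperm.map Prod.snd
    have h2 : ((List.range itemAr.length).map (fun i => (pvGet2 itemAr i j, Int.ofNat i))).map Prod.snd
        = (List.range itemAr.length).map (fun i => Int.ofNat i) := by
      rw [List.map_map]; rfl
    rw [h2] at h1
    exact h1
  · rw [List.pairwise_map]
    apply hpw.imp_of_mem
    intro a b ha hb hab
    rcases hab with h | h
    · left; rw [hmem1 a ha, hmem1 b hb]; exact h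
    · right
      constructor
      · rw [hmem1 a ha, hmem1 b hb]; exact h.1
      · exact h.2

-- getD on a replicate column is always the fill value
theorem pvGetD_replicate (p0 j : Nat) : (List.replicate p0 (0:Int)).getD j 0 = 0 := by
  rw [List.getD_eq_getElem?_getD, List.getElem?_replicate]
  by_cases h : j < p0 <;> simp [h]

-- B's initial predSeq: shape and columns
theorem pvShape_B0 (pred : List (List Int)) (p0 : Nat) :
    pvShape (pred.map (fun _ => List.replicate p0 (0:Int))) pred.length p0 := by
  constructor
  · simp
  · intro r hr
    obtain ⟨_, _, rfl⟩ := List.mem_map.mp hr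
    simp

theorem pvColOf_B0 (pred : List (List Int)) (p0 j : Nat) :
    pvColOf (pred.map (fun _ => List.replicate p0 (0:Int))) j = List.replicate pred.length (0:Int) := by
  unfold pvColOf
  rw [List.map_map]
  have : ∀ r ∈ pred, (((fun r => r.getD j 0) ∘ fun _ => List.replicate p0 (0:Int))) r = (0:Int) := by
    intro r _
    simp only [Function.comp]
    exact pvGetD_replicate p0 j
  rw [List.map_congr_left this, List.map_const']

-- the two ports compute the same pair
theorem pvMainEq (pred itemAr : List (List Int)) (hPre : Pre_P_ArrSeq pred itemAr) :
    P_ArrSeq pred itemAr = P_ArrSeq_alt pred itemAr := by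
  obtain ⟨hne, hcase⟩ := hPre
  simp only [P_ArrSeq, P_ArrSeq_alt]
  rw [Prod.mk.injEq]
  refine ⟨rfl, ?_⟩
  show (List.foldl (fun (st : List (List Int) × List (List Int)) (j : Nat) => pvStepA itemAr.length j st)
      ((List.range itemAr.length).foldl (fun m i => (List.range (itemAr.headD []).length).foldl
          (fun m j => pvSet2 m i j (pvGet2 itemAr i j)) m)
        ((List.range itemAr.length).map (fun _ => (List.range (itemAr.headD []).length).map (fun _ => (0:Int)))),
       (List.range (itemAr.headD []).length).foldl (fun ps j => ((List.range itemAr.length).foldl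
          (fun (st : List (List Int) × Int) i => (pvSet2 st.1 i j st.2, st.2 + 1)) (ps, (0:Int))).1)
        ((List.range pred.length).map (fun _ => (List.range (pred.headD []).length).map (fun _ => (0:Int)))))
      (List.range (itemAr.headD []).length)).2
    = (List.range (itemAr.headD []).length).foldl
        (fun ps j => (PySem.List.enumerate (pvOrd itemAr j)).foldl
          (fun ps p => pvSet2 ps p.1.toNat j p.2) ps)
        (pred.map (fun _ => List.replicate (pred.headD []).length (0:Int)))
  rcases hcase with h0 | ⟨hrow, hpredne, hnp, hncp⟩
  · -- zero columns: all loops are empty, both sides are the zero matrix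
    rw [h0]
    simp only [List.range_zero, List.foldl_nil, PySem.List.foldl_ignore]
    rw [List.map_const', List.map_const', List.map_const', List.length_range, List.length_range]
  · -- the general case
    rw [pvCopyPhase itemAr itemAr.length (itemAr.headD []).length rfl]
    obtain ⟨hnumS, hnumC⟩ := pvNumPhase pred.length (pred.headD []).length itemAr.length
      (itemAr.headD []).length hnp hncp
    have hMshape := pvShape_map_map (fun i j => pvGet2 itemAr i j) itemAr.length
      (itemAr.headD []).length
    obtain ⟨hsortS, hsortC⟩ := pvCol_fold
      (fun (st : List (List Int) × List (List Int)) =>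
        pvShape st.1 itemAr.length (itemAr.headD []).length ∧ pvShape st.2 pred.length (pred.headD []).length)
      (fun (st : List (List Int) × List (List Int)) j => (pvColOf st.1 j, pvColOf st.2 j))
      (fun st j => pvStepA itemAr.length j st)
      (fun _ c => pvTSort itemAr.length c)
      (fun j => j < (itemAr.headD []).length)
      (fun st j hs hj => pvSortStep itemAr.length (itemAr.headD []).length pred.length
        (pred.headD []).length hnp hncp st j hs hj)
      (List.range (itemAr.headD []).length) List.nodup_range (fun j hj => List.mem_range.mp hj)
      ((List.range itemAr.length).map (fun i => (List.range (itemAr.headD []).length).map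
        (fun j => pvGet2 itemAr i j)),
       (List.range (itemAr.headD []).length).foldl (fun ps j => ((List.range itemAr.length).foldl
          (fun (st : List (List Int) × Int) i => (pvSet2 st.1 i j st.2, st.2 + 1)) (ps, (0:Int))).1)
        ((List.range pred.length).map (fun _ => (List.range (pred.headD []).length).map (fun _ => (0:Int)))))
      ⟨hMshape, hnumS⟩
    have hstepB : ∀ (ps : List (List Int)) (j : Nat),
        pvShape ps pred.length (pred.headD []).length → j < (itemAr.headD []).length →
        pvShape ((PySem.List.enumerate (pvOrd itemAr j)).foldl
          (fun ps p => pvSet2 ps p.1.toNat j p.2) ps) pred.length (pred.headD []).length ∧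
        (∀ j', j' ≠ j → pvColOf ((PySem.List.enumerate (pvOrd itemAr j)).foldl
          (fun ps p => pvSet2 ps p.1.toNat j p.2) ps) j' = pvColOf ps j') ∧
        pvColOf ((PySem.List.enumerate (pvOrd itemAr j)).foldl
          (fun ps p => pvSet2 ps p.1.toNat j p.2) ps) j
          = pvOrd itemAr j ++ (pvColOf ps j).drop itemAr.length := by
      intro ps j hs hj
      obtain ⟨hs', ho', hc'⟩ := pvFoldl_set2_col j (by omega) (fun p => p.1.toNat) (fun p => p.2)
        (PySem.List.enumerate (pvOrd itemAr j)) ps hs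
      refine ⟨hs', ho', ?_⟩
      rw [hc']
      have := pvEnumSet (pvOrd itemAr j) [] (pvColOf ps j)
        (by rw [pvOrd_len, pvLen_colOf, hs.1]; omega)
      simp only [List.length_nil, Nat.cast_zero, List.nil_append] at this
      rw [this, pvOrd_len]
    obtain ⟨hBS, hBC⟩ := pvCol_fold
      (fun ps => pvShape ps pred.length (pred.headD []).length) pvColOf
      (fun ps j => (PySem.List.enumerate (pvOrd itemAr j)).foldl
        (fun ps p => pvSet2 ps p.1.toNat j p.2) ps)
      (fun j c => pvOrd itemAr j ++ c.drop itemAr.length)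
      (fun j => j < (itemAr.headD []).length) hstepB
      (List.range (itemAr.headD []).length) List.nodup_range (fun j hj => List.mem_range.mp hj)
      (pred.map (fun _ => List.replicate (pred.headD []).length (0:Int)))
      (pvShape_B0 pred (pred.headD []).length)
    apply pvEq_of_colOf hsortS.2 hBS
    intro j hj
    have hA := congrArg Prod.snd (hsortC j)
    rw [apply_ite Prod.snd] at hA
    dsimp only at hA
    rw [hA, hBC j, pvColOf_B0]
    by_cases hjnc : j < (itemAr.headD []).length
    · simp only [List.mem_range, hjnc, if_true]
      rw [pvColOf_map_map _ _ _ _ hjnc, hnumC j]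
      simp only [hjnc, if_true]
      unfold pvTSort
      rw [List.take_left' (by simp), List.drop_left' (by simp), List.zip_map', List.drop_replicate]
      rw [pvOrdEq]
    · simp only [List.mem_range, hjnc, if_false]
      rw [hnumC j]
      simp only [hjnc, if_false, List.drop_replicate]

-- ===== VERDICT (by name: the statement is the Claim_ definition above) =====
theorem P_ArrSeq_spec : Claim_equal_P_ArrSeq := by
  intro pred itemAr _ hPre
  unfold Spec_P_ArrSeq
  exact pvMainEq pred itemAr hPre
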